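-- pv_equiv track=rewrite | github.com/Senum2001/Anomaly_Detection_SDC_Pebble | pipeline.py | _filter_faulty_inside_potential
-- ===== SOURCE A (Python) =====
-- def _filter_faulty_inside_potential(boxes, labels):
--     filtered_boxes, filtered_labels = [], []
--     for (box, label) in zip(boxes, labels):
--         if label == "Point Overload (Potential)":
--             keep = True
--             x, y, w, h = box
--             for (fbox, flabel) in zip(boxes, labels):
--                 if flabel == "Point Overload (Faulty)":
--                     fx, fy, fw, fh = fbox
--                     if fx >= x and fy >= y and fx + fw <= x + w and fy + fh <= y + h:
--                         keep = False
--                         break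
--             if keep:
--                 filtered_boxes.append(box)
--                 filtered_labels.append(label)
--         else:
--             filtered_boxes.append(box)
--             filtered_labels.append(label)
--     return filtered_boxes, filtered_labels
-- ===== SOURCE B (Python) =====
-- def _filter_faulty_inside_potential(boxes, labels):
--     # Inverted loops: iterate over FAULTY boxes and mark the potential boxes
--     # that contain them in a removal array, then emit unmarked pairs by index.
--     pairs = list(zip(boxes, labels))
--     n = len(pairs)
--     removed = [False] * n
--     pot_idx = [i for i in range(n) if pairs[i][1] == "Point Overload (Potential)"]
--     for fbox, flabel in pairs:
--         if flabel == "Point Overload (Faulty)":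
--             fx, fy, fw, fh = fbox
--             for i in pot_idx:
--                 if not removed[i]:
--                     x, y, w, h = pairs[i][0]
--                     if fx >= x and fy >= y and fx + fw <= x + w and fy + fh <= y + h:
--                         removed[i] = True
--     filtered_boxes = [pairs[i][0] for i in range(n) if not removed[i]]
--     filtered_labels = [pairs[i][1] for i in range(n) if not removed[i]]
--     return filtered_boxes, filtered_labels
-- ===== Notes on version B (the rewrite author's own statement) =====
-- stated objective: alternative
-- what changed: B inverts the loop nesting: instead of A's per-potential rescan of the whole list with a break flag and append accumulators, B keeps a boolean removal array, iterates once over the faulty boxes marking every potential box that contains them, and finally emits the unmarked pairs by index.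
import Mathlib
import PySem

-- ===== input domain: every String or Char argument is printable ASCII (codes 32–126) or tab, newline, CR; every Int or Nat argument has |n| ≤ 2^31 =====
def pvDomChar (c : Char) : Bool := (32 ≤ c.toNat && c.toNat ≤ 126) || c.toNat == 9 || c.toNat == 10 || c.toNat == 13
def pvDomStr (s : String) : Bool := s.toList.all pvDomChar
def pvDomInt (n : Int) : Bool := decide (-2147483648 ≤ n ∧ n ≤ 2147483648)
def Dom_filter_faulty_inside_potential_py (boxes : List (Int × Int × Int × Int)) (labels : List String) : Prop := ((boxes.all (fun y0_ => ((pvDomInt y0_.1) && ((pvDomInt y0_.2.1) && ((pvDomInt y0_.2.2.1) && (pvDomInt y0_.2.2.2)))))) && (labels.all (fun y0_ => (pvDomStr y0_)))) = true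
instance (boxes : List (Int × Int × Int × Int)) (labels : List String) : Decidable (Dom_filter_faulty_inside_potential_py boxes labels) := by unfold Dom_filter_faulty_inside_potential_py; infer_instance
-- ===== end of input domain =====

-- B inverts the loops: it marks, per faulty box, the potential boxes containing it in a removal array, instead of A's per-potential rescan; objective: alternative.


-- ===== PORT A =====
-- A's inner "for … break" loop: scan the zipped pairs, return false on the first faulty box inside (x,y,w,h)
def pvInnerA (pairs : List ((Int × Int × Int × Int) × String)) (x y w h : Int) : Bool :=
  match pairs with
  | [] => true
  | (fbox, flabel) :: rest =>
    if flabel == "Point Overload (Faulty)" then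
      if fbox.1 ≥ x && fbox.2.1 ≥ y && fbox.1 + fbox.2.2.1 ≤ x + w && fbox.2.1 + fbox.2.2.2 ≤ y + h then
        false
      else pvInnerA rest x y w h
    else pvInnerA rest x y w h

def filter_faulty_inside_potential_py (boxes : List (Int × Int × Int × Int)) (labels : List String) : (List (Int × Int × Int × Int)) × List String :=
  let pairs := boxes.zip labels
  pairs.foldl (fun (acc : List (Int × Int × Int × Int) × List String) p =>
    if p.2 == "Point Overload (Potential)" then
      if pvInnerA pairs p.1.1 p.1.2.1 p.1.2.2.1 p.1.2.2.2 then (acc.1 ++ [p.1], acc.2 ++ [p.2]) else acc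
    else (acc.1 ++ [p.1], acc.2 ++ [p.2])) ([], [])

-- ===== PORT B =====
def pvDefPair : (Int × Int × Int × Int) × String := ((0, 0, 0, 0), "")

def pvContains (b f : Int × Int × Int × Int) : Bool :=
  f.1 ≥ b.1 && f.2.1 ≥ b.2.1 && f.1 + f.2.2.1 ≤ b.1 + b.2.2.1 && f.2.1 + f.2.2.2 ≤ b.2.1 + b.2.2.2

-- B's inner loop: for one faulty box f, mark every still-unmarked potential index whose box contains f
-- (list indexing is always in range in Source B, so getD with a dummy default is exact)
def pvMarkOne (pairs : List ((Int × Int × Int × Int) × String)) (potIdx : List Nat)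
    (removed : List Bool) (f : Int × Int × Int × Int) : List Bool :=
  potIdx.foldl (fun rem i =>
    if !(rem.getD i false) then
      if pvContains (pairs.getD i pvDefPair).1 f then rem.set i true else rem
    else rem) removed

def filter_faulty_inside_potential_py_alt (boxes : List (Int × Int × Int × Int)) (labels : List String) : (List (Int × Int × Int × Int)) × List String :=
  let pairs := boxes.zip labels
  let n := pairs.length
  let potIdx := (List.range n).filter (fun i => (pairs.getD i pvDefPair).2 == "Point Overload (Potential)")
  let removed := pairs.foldl (fun rem p =>
    if p.2 == "Point Overload (Faulty)" then pvMarkOne pairs potIdx rem p.1 else rem)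
    (List.replicate n false)
  (((List.range n).filter (fun i => !(removed.getD i false))).map (fun i => (pairs.getD i pvDefPair).1),
   ((List.range n).filter (fun i => !(removed.getD i false))).map (fun i => (pairs.getD i pvDefPair).2))

-- ===== PRECONDITION & SPEC =====
def Spec_filter_faulty_inside_potential_py (boxes : List (Int × Int × Int × Int)) (labels : List String) (out : (List (Int × Int × Int × Int)) × List String) : Prop := out = filter_faulty_inside_potential_py_alt boxes labels
instance (boxes : List (Int × Int × Int × Int)) (labels : List String) (out : (List (Int × Int × Int × Int)) × List String) : Decidable (Spec_filter_faulty_inside_potential_py boxes labels out) := by unfold Spec_filter_faulty_inside_potential_py; infer_instance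

-- ===== CLAIM (what is proved, stated in full; the proofs are below) =====
def Claim_equal_filter_faulty_inside_potential_py : Prop := ∀ (boxes : List (Int × Int × Int × Int)) (labels : List String), Dom_filter_faulty_inside_potential_py boxes labels → Spec_filter_faulty_inside_potential_py boxes labels (filter_faulty_inside_potential_py boxes labels)

-- ===== LEMMAS AND PROOFS =====

-- A's break loop is true iff no faulty pair's box is contained in the given box.
theorem pvInnerA_eq (pairs : List ((Int × Int × Int × Int) × String)) (x y w h : Int) :
    pvInnerA pairs x y w h
      = !(pairs.any (fun q => (q.2 == "Point Overload (Faulty)") && pvContains (x, y, w, h) q.1)) := by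
  induction pairs with
  | nil => simp [pvInnerA]
  | cons p rest ih =>
    obtain ⟨fbox, flabel⟩ := p
    by_cases hl : (flabel == "Point Overload (Faulty)") = true
    · by_cases hc : (fbox.1 ≥ x && fbox.2.1 ≥ y && fbox.1 + fbox.2.2.1 ≤ x + w && fbox.2.1 + fbox.2.2.2 ≤ y + h) = true
      · have hc' : pvContains (x, y, w, h) fbox = true := by
          simp only [pvContains, ge_iff_le] at hc ⊢
          simpa using hc
        simp [pvInnerA, hl, hc, hc']
      · simp only [pvInnerA, hl, if_true, hc, if_false, Bool.false_eq_true, ih, List.any_cons]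
        have : pvContains (x, y, w, h) fbox = false := by
          simp only [pvContains, ge_iff_le] at hc ⊢
          simpa using hc
        simp [this]
    · simp [pvInnerA, hl, Bool.false_eq_true, ih]

-- A's outer foldl with append-accumulators equals the filtered list.
theorem pvFoldA_eq_filter (ps : List ((Int × Int × Int × Int) × String))
    (keep : (Int × Int × Int × Int) → Bool) (acc : List (Int × Int × Int × Int) × List String) :
    ps.foldl (fun (acc : List (Int × Int × Int × Int) × List String) p =>
        if p.2 == "Point Overload (Potential)" then
          if keep p.1 then (acc.1 ++ [p.1], acc.2 ++ [p.2]) else acc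
        else (acc.1 ++ [p.1], acc.2 ++ [p.2])) acc
      = (acc.1 ++ ((ps.filter (fun p => p.2 != "Point Overload (Potential)" || keep p.1)).map Prod.fst),
         acc.2 ++ ((ps.filter (fun p => p.2 != "Point Overload (Potential)" || keep p.1)).map Prod.snd)) := by
  induction ps generalizing acc with
  | nil => simp
  | cons p rest ih =>
    simp only [List.foldl_cons, List.filter_cons]
    by_cases hl : (p.2 == "Point Overload (Potential)") = true
    · by_cases hk : keep p.1 = true
      · have ht : (p.2 != "Point Overload (Potential)" || keep p.1) = true := by simp [hk]
        simp only [hl, if_true, hk]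
        rw [ih]; simp [List.append_assoc]
      · have hf : (p.2 != "Point Overload (Potential)" || keep p.1) = false := by simp [bne, hl, hk]
        rw [hf]
        simp only [Bool.false_eq_true, if_false, hl, if_true, hk]
        rw [ih]
    · have ht : (p.2 != "Point Overload (Potential)" || keep p.1) = true := by simp [bne, hl]
      simp only [hl, Bool.false_eq_true, if_false, ht, if_true, List.map_cons]
      rw [ih]; simp [List.append_assoc]

-- one pvMarkOne step, pointwise
theorem pvMarkOne_getD (pairs : List ((Int × Int × Int × Int) × String)) (potIdx : List Nat)
    (removed : List Bool) (f : Int × Int × Int × Int) (j : Nat)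
    (hlt : ∀ i ∈ potIdx, i < removed.length) :
    (pvMarkOne pairs potIdx removed f).getD j false
      = (removed.getD j false || (potIdx.contains j && pvContains (pairs.getD j pvDefPair).1 f)) := by
  induction potIdx generalizing removed with
  | nil => simp [pvMarkOne]
  | cons i rest ih =>
    have hi : i < removed.length := hlt i (by simp)
    have hrest : ∀ k ∈ rest, k < removed.length := fun k hk => hlt k (by simp [hk])
    simp only [pvMarkOne, List.foldl_cons] at *
    cases hr : removed.getD i false with
    | true =>
      simp only [Bool.not_true, Bool.false_eq_true, if_false]
      rw [ih removed hrest]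
      by_cases hij : i = j
      · subst hij; rw [hr, List.contains_cons]
        simp
      · have hne : (j == i) = false := by simp [Ne.symm hij]
        rw [List.contains_cons, hne]; simp
    | false =>
      cases hc : pvContains (pairs.getD i pvDefPair).1 f with
      | true =>
        simp only [Bool.not_false, reduceIte]
        rw [ih (removed.set i true) (by simpa using hrest)]
        by_cases hij : i = j
        · subst hij
          have e2 : (removed.set i true).getD i false = true := by
            simp [List.getD_eq_getElem?_getD, hi]
          have hc' : pvContains (pairs[i]?.getD pvDefPair).1 f = true := by simpa using hc
          rw [e2, hr, List.contains_cons]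
          simp [hc']
        · have e2 : (removed.set i true).getD j false = removed.getD j false := by
            simp [List.getD_eq_getElem?_getD, List.getElem?_set_ne hij]
          have hne : (j == i) = false := by simp [Ne.symm hij]
          rw [e2, List.contains_cons, hne]; simp
      | false =>
        simp only [Bool.not_false, Bool.false_eq_true, reduceIte]
        rw [ih removed hrest]
        by_cases hij : i = j
        · subst hij
          rw [hc, List.contains_cons]
          simp
        · have hne : (j == i) = false := by simp [Ne.symm hij]
          rw [List.contains_cons, hne]; simp

-- pvMarkOne preserves the length
theorem pvMarkOne_length (pairs : List ((Int × Int × Int × Int) × String)) (potIdx : List Nat)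
    (removed : List Bool) (f : Int × Int × Int × Int) :
    (pvMarkOne pairs potIdx removed f).length = removed.length := by
  induction potIdx generalizing removed with
  | nil => rfl
  | cons i rest ih =>
    simp only [pvMarkOne, List.foldl_cons] at *
    by_cases h1 : (!(removed.getD i false)) = true
    · by_cases h2 : pvContains (pairs.getD i pvDefPair).1 f = true
      · rw [if_pos h1, if_pos h2, ih (removed.set i true)]
        simp
      · rw [if_pos h1, if_neg h2, ih removed]
    · rw [if_neg h1, ih removed]

-- the full faulty pass, pointwise
theorem pvFoldMark_getD (pairs : List ((Int × Int × Int × Int) × String))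
    (ps : List ((Int × Int × Int × Int) × String)) (potIdx : List Nat)
    (removed : List Bool) (j : Nat)
    (hlt : ∀ i ∈ potIdx, i < removed.length) :
    (ps.foldl (fun rem p =>
        if p.2 == "Point Overload (Faulty)" then pvMarkOne pairs potIdx rem p.1 else rem) removed).getD j false
      = (removed.getD j false
          || (potIdx.contains j
              && ps.any (fun q => (q.2 == "Point Overload (Faulty)") && pvContains (pairs.getD j pvDefPair).1 q.1))) := by
  induction ps generalizing removed with
  | nil => simp
  | cons p rest ih =>
    simp only [List.foldl_cons, List.any_cons]
    by_cases hl : (p.2 == "Point Overload (Faulty)") = true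
    · rw [if_pos hl]
      rw [ih (pvMarkOne pairs potIdx removed p.1)
            (by rw [pvMarkOne_length]; exact hlt)]
      rw [pvMarkOne_getD pairs potIdx removed p.1 j hlt]
      cases h1 : removed.getD j false <;> cases h2 : potIdx.contains j <;> simp [hl]
    · rw [if_neg hl, ih removed hlt]
      simp [hl]

-- range-map-getD reconstructs the list
theorem range_map_getD {α : Type} (l : List α) (d : α) :
    (List.range l.length).map (fun i => l.getD i d) = l := by
  induction l with
  | nil => simp
  | cons a t ih =>
    simp only [List.length_cons, List.range_succ_eq_map, List.map_cons, List.map_map]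
    simpa [Function.comp] using ih

-- filtering by index then reading off equals filtering the list
theorem range_filter_map_getD {α : Type} (l : List α) (d : α) (p : α → Bool) :
    ((List.range l.length).filter (fun i => p (l.getD i d))).map (fun i => l.getD i d)
      = l.filter p := by
  have h := List.filter_map (f := fun i => l.getD i d) (p := p) (l := List.range l.length)
  rw [range_map_getD] at h
  simp only [Function.comp_def] at h
  exact h.symm

-- ===== VERDICT (by name: the statement is the Claim_ definition above) =====
theorem filter_faulty_inside_potential_py_spec : Claim_equal_filter_faulty_inside_potential_py := by
  intro boxes labels _
  show _ = _
  unfold filter_faulty_inside_potential_py filter_faulty_inside_potential_py_alt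
  simp only []
  set pairs := boxes.zip labels with hpairs
  set potIdx := (List.range pairs.length).filter (fun i => (pairs.getD i pvDefPair).2 == "Point Overload (Potential)") with hpot
  have hlt : ∀ i ∈ potIdx, i < (List.replicate pairs.length false).length := by
    intro i hi
    rw [hpot, List.mem_filter] at hi
    simpa using List.mem_range.mp hi.1
  have hmemPot : ∀ j, potIdx.contains j
      = (decide (j < pairs.length) && ((pairs.getD j pvDefPair).2 == "Point Overload (Potential)")) := by
    intro j
    rw [hpot, Bool.eq_iff_iff]
    simp [List.mem_filter, List.mem_range]
  -- rewrite A as a filter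
  rw [pvFoldA_eq_filter pairs (fun b => pvInnerA pairs b.1 b.2.1 b.2.2.1 b.2.2.2) ([], [])]
  simp only [List.nil_append]
  -- rewrite B's removed array pointwise and turn the index filter into a list filter
  have hrem : ∀ j, j < pairs.length →
      ((pairs.foldl (fun rem p =>
          if p.2 == "Point Overload (Faulty)" then pvMarkOne pairs potIdx rem p.1 else rem)
          (List.replicate pairs.length false)).getD j false)
        = (((pairs.getD j pvDefPair).2 == "Point Overload (Potential)")
            && pairs.any (fun q => (q.2 == "Point Overload (Faulty)") && pvContains (pairs.getD j pvDefPair).1 q.1)) := by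
    intro j hj
    rw [pvFoldMark_getD pairs pairs potIdx (List.replicate pairs.length false) j hlt]
    rw [hmemPot j]
    simp [List.getD_eq_getElem?_getD, hj]
  have hBfilter :
      ((List.range pairs.length).filter (fun i =>
        !((pairs.foldl (fun rem p =>
            if p.2 == "Point Overload (Faulty)" then pvMarkOne pairs potIdx rem p.1 else rem)
            (List.replicate pairs.length false)).getD i false)))
      = ((List.range pairs.length).filter (fun i =>
          ((pairs.getD i pvDefPair).2 != "Point Overload (Potential)")
            || pvInnerA pairs (pairs.getD i pvDefPair).1.1 (pairs.getD i pvDefPair).1.2.1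
                (pairs.getD i pvDefPair).1.2.2.1 (pairs.getD i pvDefPair).1.2.2.2)) := by
    apply List.filter_congr
    intro i hi
    have hij := List.mem_range.mp hi
    rw [hrem i hij, pvInnerA_eq]
    have heta : ((pairs.getD i pvDefPair).1.1, (pairs.getD i pvDefPair).1.2.1,
        (pairs.getD i pvDefPair).1.2.2.1, (pairs.getD i pvDefPair).1.2.2.2)
        = (pairs.getD i pvDefPair).1 := rfl
    rw [heta]
    simp only [bne]
    exact Bool.not_and _ _
  rw [hBfilter]
  have hfin := range_filter_map_getD pairs pvDefPair
    (fun p => (p.2 != "Point Overload (Potential)")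
        || pvInnerA pairs p.1.1 p.1.2.1 p.1.2.2.1 p.1.2.2.2)
  refine Prod.ext ?_ ?_ <;> simp only
  · rw [show ((List.range pairs.length).filter _).map (fun i => (pairs.getD i pvDefPair).1)
        = (((List.range pairs.length).filter (fun i =>
            ((pairs.getD i pvDefPair).2 != "Point Overload (Potential)")
              || pvInnerA pairs (pairs.getD i pvDefPair).1.1 (pairs.getD i pvDefPair).1.2.1
                  (pairs.getD i pvDefPair).1.2.2.1 (pairs.getD i pvDefPair).1.2.2.2)).map
            (fun i => pairs.getD i pvDefPair)).map Prod.fst by simp [List.map_map, Function.comp]]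
    rw [hfin]
  · rw [show ((List.range pairs.length).filter _).map (fun i => (pairs.getD i pvDefPair).2)
        = (((List.range pairs.length).filter (fun i =>
            ((pairs.getD i pvDefPair).2 != "Point Overload (Potential)")
              || pvInnerA pairs (pairs.getD i pvDefPair).1.1 (pairs.getD i pvDefPair).1.2.1
                  (pairs.getD i pvDefPair).1.2.2.1 (pairs.getD i pvDefPair).1.2.2.2)).map
            (fun i => pairs.getD i pvDefPair)).map Prod.snd by simp [List.map_map, Function.comp]]
    rw [hfin]
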